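-- pv_equiv track=rewrite | github.com/joanibal/RRAlinter | RRAlinter/linter.py | remove_math
-- ===== SOURCE A (Python) =====
-- from typing import List, Dict, Tuple
--
-- def remove_math(latex: Dict[str, List[str]]):
--     """
--     Removes all characters enclosed in a math block
--     :param latex: Dict[str, List[str]]
--         A mapping of file names onto a list of that file's lines
--     """
--     for file_name in latex:
--         file = latex[file_name]
--         math_mode: bool = False
--         for i in range(len(file)):
--             new_line = ""
--             for c in file[i]:
--                 if c == "$":
--                     math_mode = not math_mode
--                 elif not math_mode:
--                     new_line += c
--             file[i] = new_line
--     return latex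
-- ===== SOURCE B (Python) =====
-- def remove_math(latex):
--     """
--     Removes all characters enclosed in a math block.
--     Splits each line on '$' once and keeps alternate segments by parity,
--     instead of scanning character by character.
--     Mutates the line lists in place and returns the same dict, like A.
--     """
--     for file_name in latex:
--         file = latex[file_name]
--         math_mode = False
--         for i in range(len(file)):
--             parts = file[i].split('$')
--             start = 1 if math_mode else 0
--             file[i] = ''.join(parts[start::2])
--             math_mode = math_mode != ((len(parts) - 1) % 2 == 1)
--     return latex
-- ===== Notes on version B (the rewrite author's own statement) =====
-- stated objective: simpler
-- what changed: Replaces the per-character boolean-state scan with one split('$') per line, keeping alternate segments by parity and flipping the carried math_mode by the parity of the number of '$'.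
import Mathlib
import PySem

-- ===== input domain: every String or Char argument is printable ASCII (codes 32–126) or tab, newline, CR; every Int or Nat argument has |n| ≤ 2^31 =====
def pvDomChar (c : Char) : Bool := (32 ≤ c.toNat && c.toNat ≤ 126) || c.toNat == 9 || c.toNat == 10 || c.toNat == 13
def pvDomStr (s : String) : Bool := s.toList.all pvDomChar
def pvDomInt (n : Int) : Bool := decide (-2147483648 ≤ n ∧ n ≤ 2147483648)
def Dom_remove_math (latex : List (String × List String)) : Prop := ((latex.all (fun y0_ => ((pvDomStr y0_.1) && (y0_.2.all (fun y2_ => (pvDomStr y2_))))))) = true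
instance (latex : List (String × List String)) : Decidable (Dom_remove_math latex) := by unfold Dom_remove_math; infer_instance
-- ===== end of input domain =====

-- B replaces A's per-character boolean-state scan by one split on '$' per line, keeping
-- alternate segments by parity (objective: simpler). A mutates the caller's line lists in
-- place and returns the same dict; B performs the same mutation; the equivalence proved
-- here is about the returned value.

-- ===== PORT A =====
-- the inner 'for c in file[i]' loop: flip math_mode on '$', otherwise append when not in math mode
def pvStepA (st : Bool × List Char) (c : Char) : Bool × List Char :=
  if c = '$' then (!st.1, st.2)
  else if st.1 then st
  else (st.1, st.2 ++ [c])

def pvLineA (m : Bool) (cs : List Char) : Bool × List Char :=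
  cs.foldl pvStepA (m, [])

-- the 'for i in range(len(file)): file[i] = new_line' loop, threading math_mode
def pvFileA (lines : List String) : List String :=
  (lines.foldl (fun (st : List String × Bool) s =>
     let r := pvLineA st.2 s.toList
     (st.1 ++ [String.ofList r.2], r.1)) ([], false)).1

def remove_math (latex : List (String × List String)) : List (String × List String) :=
  latex.map (fun p => (p.1, pvFileA p.2))

-- ===== PORT B =====
-- port of Python's line.split('$') (exact for a one-character separator)
def pvSplitDollar : List Char → List (List Char)
  | [] => [[]]
  | c :: cs =>
      if c = '$' then [] :: pvSplitDollar cs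
      else
        match pvSplitDollar cs with
        | [] => [[c]]          -- unreachable: pvSplitDollar never returns []
        | h :: t => (c :: h) :: t

-- port of parts[start::2] for start = 0 (keep = true) or 1 (keep = false), step 2
def pvPickAlt {α : Type} (keep : Bool) : List α → List α
  | [] => []
  | x :: xs => if keep then x :: pvPickAlt false xs else pvPickAlt true xs

-- one line of Source B's loop body: (new line, new math_mode)
def pvLineB (m : Bool) (cs : List Char) : List Char × Bool :=
  let parts := pvSplitDollar cs
  (PySem.Chars.join [] (pvPickAlt (!m) parts),
   m != decide ((parts.length - 1) % 2 = 1))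

def pvFileB (lines : List String) : List String :=
  (lines.foldl (fun (st : List String × Bool) s =>
     let r := pvLineB st.2 s.toList
     (st.1 ++ [String.ofList r.1], r.2)) ([], false)).1

def remove_math_alt (latex : List (String × List String)) : List (String × List String) :=
  latex.map (fun p => (p.1, pvFileB p.2))

-- ===== PRECONDITION & SPEC =====
def Spec_remove_math (latex : List (String × List String)) (out : List (String × List String)) : Prop := out = remove_math_alt latex
instance (latex : List (String × List String)) (out : List (String × List String)) : Decidable (Spec_remove_math latex out) := by unfold Spec_remove_math; infer_instance

-- ===== CLAIM (what is proved, stated in full; the proofs are below) =====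
def Claim_equal_remove_math : Prop := ∀ (latex : List (String × List String)), Dom_remove_math latex → Spec_remove_math latex (remove_math latex)

-- ===== LEMMAS AND PROOFS =====

theorem pvSplitDollar_ne_nil (cs : List Char) : pvSplitDollar cs ≠ [] := by
  cases cs with
  | nil => simp [pvSplitDollar]
  | cons c cs =>
      simp only [pvSplitDollar]
      split
      · simp
      · cases h : pvSplitDollar cs <;> simp

theorem pvJoin_nil_cons (a : List Char) (l : List (List Char)) :
    PySem.Chars.join [] (a :: l) = a ++ PySem.Chars.join [] l := by
  cases l with
  | nil => simp [PySem.Chars.join, List.intercalate]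
  | cons b t => simp [PySem.Chars.join, List.intercalate]

-- the core line-level invariant: A's character scan equals B's split-by-parity
theorem pvLine_key (cs : List Char) (m : Bool) (acc : List Char) :
    cs.foldl pvStepA (m, acc) =
      ((m != decide (((pvSplitDollar cs).length - 1) % 2 = 1)),
       acc ++ PySem.Chars.join [] (pvPickAlt (!m) (pvSplitDollar cs))) := by
  induction cs generalizing m acc with
  | nil =>
      cases m <;> simp [pvSplitDollar, pvPickAlt, PySem.Chars.join, List.intercalate]
  | cons c cs ih =>
      by_cases hc : c = '$'
      · subst hc
        have hlen : 1 ≤ (pvSplitDollar cs).length :=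
          List.length_pos_of_ne_nil (pvSplitDollar_ne_nil cs)
        have hpar : ((pvSplitDollar cs).length % 2 = 1) ↔
            ¬ (((pvSplitDollar cs).length - 1) % 2 = 1) := by omega
        simp only [List.foldl_cons, pvStepA, pvSplitDollar, ih]
        simp only [if_true, Prod.mk.injEq]
        constructor
        · simp only [List.length_cons, Nat.add_sub_cancel]
          rcases Nat.even_or_odd (pvSplitDollar cs).length with h | h
          · have h1 : ¬ ((pvSplitDollar cs).length % 2 = 1) := by
              rcases h with ⟨k, hk⟩; omega
            have h2 : ((pvSplitDollar cs).length - 1) % 2 = 1 := by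
              rcases h with ⟨k, hk⟩; omega
            simp [h1, h2]
          · have h1 : (pvSplitDollar cs).length % 2 = 1 := Nat.odd_iff.mp h
            have h2 : ¬ (((pvSplitDollar cs).length - 1) % 2 = 1) := by
              rcases h with ⟨k, hk⟩; omega
            simp [h1, h2]
        · cases m <;>
            simp [pvPickAlt, pvJoin_nil_cons]
      · rcases hsp : pvSplitDollar cs with _ | ⟨h, t⟩
        · exact absurd hsp (pvSplitDollar_ne_nil cs)
        · cases m with
          | true =>
              simp only [List.foldl_cons, pvStepA, if_neg hc]
              rw [ih]
              simp [pvSplitDollar, if_neg hc, hsp, pvPickAlt]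
          | false =>
              simp only [List.foldl_cons, pvStepA, if_neg hc]
              rw [ih]
              simp [pvSplitDollar, if_neg hc, hsp, pvPickAlt, pvJoin_nil_cons]

theorem pvLineAB (m : Bool) (cs : List Char) :
    pvLineA m cs = ((pvLineB m cs).2, (pvLineB m cs).1) := by
  simp [pvLineA, pvLineB, pvLine_key]

theorem pvFileAB (lines : List String) : pvFileA lines = pvFileB lines := by
  unfold pvFileA pvFileB
  simp only [pvLineAB]

-- ===== VERDICT (by name: the statement is the Claim_ definition above) =====
theorem remove_math_spec : Claim_equal_remove_math := by
  intro latex _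
  unfold Spec_remove_math remove_math remove_math_alt
  simp [pvFileAB]
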